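-- pv_equiv track=rewrite | github.com/deingvelop/2023-algorithm-study | minjin/programmers/구명보트.py | solution
-- ===== SOURCE A (Python) =====
-- def solution(people, limit):
--     cnt = 0
--
--     people.sort()
--
--     while people:
--         min_person = people[0]
--         max_person = people[-1]
--         if max_person + min_person > limit or len(people) == 1:
--             del people[-1]
--         else:
--             del people[0], people[-1]
--         cnt += 1
--
--     return cnt
-- ===== SOURCE B (Python) =====
-- def solution(people, limit):
--     p = sorted(people)
--     i, j = 0, len(p) - 1
--     cnt = 0
--     while i <= j:
--         if p[i] + p[j] <= limit:
--             i += 1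
--         j -= 1
--         cnt += 1
--     return cnt
-- ===== Notes on version B (the rewrite author's own statement) =====
-- stated objective: faster
-- what changed: Replaces A's destructive while-loop that repeatedly deletes from the front and back of the list (del people[0] is O(n)) with two index pointers over one sorted copy, so after sorting each step is O(1).
import Mathlib
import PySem

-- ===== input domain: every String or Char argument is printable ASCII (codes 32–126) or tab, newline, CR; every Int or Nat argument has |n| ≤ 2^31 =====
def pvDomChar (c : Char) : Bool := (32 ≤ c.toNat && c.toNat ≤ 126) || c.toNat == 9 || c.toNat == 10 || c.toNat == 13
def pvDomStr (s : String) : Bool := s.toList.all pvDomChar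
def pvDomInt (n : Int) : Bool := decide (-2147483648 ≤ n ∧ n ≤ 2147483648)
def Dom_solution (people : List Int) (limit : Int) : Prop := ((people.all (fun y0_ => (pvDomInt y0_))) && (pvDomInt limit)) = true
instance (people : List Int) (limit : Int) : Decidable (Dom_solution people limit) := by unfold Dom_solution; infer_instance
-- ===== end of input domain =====

-- B replaces A's quadratic delete-from-both-ends loop by two index pointers over one
-- sorted copy (objective: faster, asymptotic). A sorts and empties its argument in
-- place; the equivalence proved here is about the RETURN value only (B does not mutate).

-- ===== PORT A =====
-- the while loop: people nonempty → look at people[0] and people[-1], then delete from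
-- the ends as A does (del people[-1] = dropLast; del people[0], people[-1] = xs.dropLast)
def solutionLoop (limit : Int) (people : List Int) (cnt : Int) : Int :=
  match people with
  | [] => cnt
  | x :: xs =>
    let min_person := x                                   -- people[0]
    let max_person := (x :: xs).getLast (by simp)         -- people[-1] (list nonempty)
    if max_person + min_person > limit ∨ (x :: xs).length = 1 then
      solutionLoop limit ((x :: xs).dropLast) (cnt + 1)
    else
      solutionLoop limit (xs.dropLast) (cnt + 1)
termination_by people.length
decreasing_by all_goals (simp [List.length_dropLast]; try omega)

def solution (people : List Int) (limit : Int) : Int :=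
  solutionLoop limit (PySem.List.sorted people (fun y => y) false) 0

-- ===== PORT B =====
-- p[i] / p[j]: the indices are always in range while i ≤ j here (0 ≤ i, j < p.length),
-- so Python's p[i] is ported exactly by pyGetD with an arbitrary default
def solutionAltLoop (p : List Int) (limit : Int) (i j cnt : Int) : Int :=
  if h : i ≤ j then
    let i' := if PySem.List.pyGetD p i 0 + PySem.List.pyGetD p j 0 ≤ limit then i + 1 else i
    solutionAltLoop p limit i' (j - 1) (cnt + 1)
  else cnt
termination_by (j + 1 - i).toNat
decreasing_by split <;> omega

def solution_alt (people : List Int) (limit : Int) : Int :=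
  let p := PySem.List.sorted people (fun y => y) false
  solutionAltLoop p limit 0 ((p.length : Int) - 1) 0

-- ===== PRECONDITION & SPEC =====
def Spec_solution (people : List Int) (limit : Int) (out : Int) : Prop := out = solution_alt people limit
instance (people : List Int) (limit : Int) (out : Int) : Decidable (Spec_solution people limit out) := by unfold Spec_solution; infer_instance

-- ===== CLAIM (what is proved, stated in full; the proofs are below) =====
def Claim_equal_solution : Prop := ∀ (people : List Int) (limit : Int), Dom_solution people limit → Spec_solution people limit (solution people limit)

-- ===== LEMMAS AND PROOFS =====

-- the window p[i..j] (inclusive) of the fixed sorted list that A's shrinking list equals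
def pvWin (p : List Int) (i j : Int) : List Int :=
  (p.drop i.toNat).take (j + 1 - i).toNat

theorem pvWin_getElem? (p : List Int) (i j : Int) (k : Nat) :
    (pvWin p i j)[k]? = if k < (j + 1 - i).toNat then p[i.toNat + k]? else none := by
  simp [pvWin, List.getElem?_take, List.getElem?_drop]

theorem pvWin_empty (p : List Int) (i j : Int) (h : j < i) : pvWin p i j = [] := by
  simp [pvWin]; omega

theorem pvWin_length (p : List Int) (i j : Int) (h0 : 0 ≤ i)
    (hj : j < (p.length : Int)) : (pvWin p i j).length = (j + 1 - i).toNat := by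
  simp [pvWin]; omega

theorem pvWin_dropLast (p : List Int) (i j : Int) (h0 : 0 ≤ i)
    (hj : j < (p.length : Int)) : (pvWin p i j).dropLast = pvWin p i (j - 1) := by
  apply List.ext_getElem?
  intro k
  rw [List.getElem?_dropLast, pvWin_length p i j h0 hj, pvWin_getElem?, pvWin_getElem?]
  split_ifs <;> first | rfl | omega

theorem pvWin_tail (p : List Int) (i j : Int) (h0 : 0 ≤ i) :
    (pvWin p i j).tail = pvWin p (i + 1) j := by
  apply List.ext_getElem?
  intro k
  rw [List.getElem?_tail, pvWin_getElem?, pvWin_getElem?]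
  split_ifs with h1 h2
  · congr 1; omega
  · omega
  · omega
  · rfl

theorem solutionAltLoop_eq (p : List Int) (limit : Int) :
    ∀ (i j cnt : Int), 0 ≤ i → j < (p.length : Int) →
      solutionAltLoop p limit i j cnt = solutionLoop limit (pvWin p i j) cnt := by
  intro i j cnt
  induction i, j, cnt using solutionAltLoop.induct p limit with
  | case2 i j cnt h =>
    intro _ _
    rw [solutionAltLoop, pvWin_empty p i j (by omega)]
    simp [h, solutionLoop]
  | case1 i j cnt h i' ih =>
    intro h0 hj
    have hlen : (pvWin p i j).length = (j + 1 - i).toNat := pvWin_length p i j h0 hj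
    obtain ⟨x, xs, hx⟩ : ∃ x xs, pvWin p i j = x :: xs := by
      cases hw : pvWin p i j with
      | nil => rw [hw] at hlen; simp at hlen; omega
      | cons a b => exact ⟨a, b, rfl⟩
    have hiN : i.toNat < p.length := by omega
    have hjN : j.toNat < p.length := by omega
    -- head and last of the window are p[i] and p[j]
    have hhead : x = p[i.toNat] := by
      have h0' : (pvWin p i j)[(0 : Nat)]? = some x := by rw [hx]; rfl
      rw [pvWin_getElem?] at h0'
      rw [if_pos (by omega : (0 : Nat) < (j + 1 - i).toNat)] at h0'
      simp [List.getElem?_eq_getElem hiN] at h0'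
      exact h0'.symm
    have hlast : (x :: xs).getLast (by simp) = p[j.toNat] := by
      have hlen' : (x :: xs).length = (j + 1 - i).toNat := by rw [← hx]; exact hlen
      rw [List.getLast_eq_getElem]
      have hk : (pvWin p i j)[(j + 1 - i).toNat - 1]? = (x :: xs)[(j + 1 - i).toNat - 1]? := by
        rw [hx]
      rw [pvWin_getElem?] at hk
      rw [if_pos (by omega)] at hk
      have hidx : i.toNat + ((j + 1 - i).toNat - 1) = j.toNat := by omega
      rw [hidx] at hk
      simp [List.getElem?_eq_getElem hjN] at hk
      have : (x :: xs)[(j + 1 - i).toNat - 1]? = (x :: xs)[(x :: xs).length - 1]? := by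
        rw [hlen']
      rw [this] at hk
      simp at hk
      exact hk.symm
    have hgi : PySem.List.pyGetD p i 0 = p[i.toNat] :=
      PySem.List.pyGetD_eq_getElem p 0 h0 (by omega)
    have hgj : PySem.List.pyGetD p j 0 = p[j.toNat] :=
      PySem.List.pyGetD_eq_getElem p 0 (by omega) (by omega)
    -- window-shrinking equations
    have hdropLast : (x :: xs).dropLast = pvWin p i (j - 1) := by
      rw [← hx]; exact pvWin_dropLast p i j h0 hj
    have hxs : xs = pvWin p (i + 1) j := by
      have := congrArg List.tail hx
      rw [pvWin_tail p i j h0] at this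
      simpa using this.symm
    have hxsDropLast : xs.dropLast = pvWin p (i + 1) (j - 1) := by
      rw [hxs]; exact pvWin_dropLast p (i + 1) j (by omega) hj
    rw [solutionAltLoop, dif_pos h, hx, solutionLoop]
    simp only [hgi, hgj]
    by_cases hc : p[i.toNat] + p[j.toNat] ≤ limit
    · have hi'' : i' = i + 1 := by simp [i', hgi, hgj, hc]
      rw [hi''] at ih
      by_cases h1 : (x :: xs).length = 1
      · -- i = j: single person, both windows become empty next
        have hij' : i = j := by
          have : (x :: xs).length = (j + 1 - i).toNat := by rw [← hx]; exact hlen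
          omega
        rw [if_pos hc, if_pos (Or.inr h1), ih (by omega) (by omega)]
        rw [hdropLast, pvWin_empty p (i + 1) (j - 1) (by omega),
            pvWin_empty p i (j - 1) (by omega)]
      · have hne : ¬ ((x :: xs).getLast (by simp) + x > limit ∨ (x :: xs).length = 1) := by
          rintro (h' | h')
          · rw [hlast, hhead] at h'; omega
          · exact h1 h'
        rw [if_pos hc, if_neg hne, ih (by omega) (by omega), hxsDropLast]
    · have hi'' : i' = i := by simp [i', hgi, hgj, hc]
      rw [hi''] at ih
      have hgt : (x :: xs).getLast (by simp) + x > limit := by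
        rw [hlast, hhead]; omega
      rw [if_neg hc, if_pos (Or.inl hgt), ih (by omega) (by omega), hdropLast]

-- ===== VERDICT (by name: the statement is the Claim_ definition above) =====
theorem solution_spec : Claim_equal_solution := by
  intro people limit _
  unfold Spec_solution solution solution_alt
  rw [solutionAltLoop_eq _ limit 0 _ 0 le_rfl (by omega)]
  congr 1
  simp [pvWin]
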